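-- pv_equiv track=rewrite | github.com/lone1y-7/alone | v4/forensic-tool/main.py | is_valid_package_name
-- ===== SOURCE A (Python) =====
-- def is_valid_package_name(name: str) -> bool:
--     """简化包名验证：只要符合「反向域名格式」就认定为有效包名"""
--     if "." not in name:
--         return False  # 必须包含.（如 com.apple.freeform）
--     segments = name.split(".")
--     for seg in segments:
--         if not seg or not seg[0].isalnum():
--             return False  # 每段非空，且以字母/数字开头
--         for char in seg:
--             if not (char.isalnum() or char == "_"):
--                 return False  # 只允许字母/数字/下划线
--     return True
-- ===== SOURCE B (Python) =====
-- def is_valid_package_name(name: str) -> bool: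
--     """Single pass over the characters, no split(): a tiny state machine."""
--     segment_start = True  # are we at the beginning of a (new) segment?
--     saw_dot = False
--     for char in name:
--         if char == ".":
--             if segment_start:
--                 return False  # empty segment
--             segment_start = True
--             saw_dot = True
--         elif segment_start:
--             if not char.isalnum():
--                 return False  # segment must start with letter/digit
--             segment_start = False
--         else:
--             if not (char.isalnum() or char == "_"):
--                 return False
--     if segment_start:
--         return False  # empty string or trailing dot
--     return saw_dot
-- ===== Notes on version B (the rewrite author's own statement) =====
-- stated objective: alternative
-- what changed: Replaces the split-into-segments list plus nested per-segment loops with a single character-by-character state machine carrying segment_start/saw_dot flags, so no intermediate segment list is built.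
import Mathlib
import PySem

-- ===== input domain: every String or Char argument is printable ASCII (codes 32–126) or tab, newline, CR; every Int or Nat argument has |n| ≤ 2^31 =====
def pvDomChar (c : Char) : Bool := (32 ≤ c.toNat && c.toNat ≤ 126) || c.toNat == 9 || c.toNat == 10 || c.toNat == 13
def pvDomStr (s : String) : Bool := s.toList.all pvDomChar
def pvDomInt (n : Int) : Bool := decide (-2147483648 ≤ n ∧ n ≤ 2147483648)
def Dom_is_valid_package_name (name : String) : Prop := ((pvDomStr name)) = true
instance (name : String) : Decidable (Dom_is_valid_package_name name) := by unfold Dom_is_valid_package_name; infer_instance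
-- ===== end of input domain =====

-- B replaces split('.') + nested loops by a one-pass character state machine; same result, no intermediate segment list.

-- ===== PORT A =====
-- inner loop: 'for char in seg: if not (char.isalnum() or char == "_"): return False'
def pvCheckChars : List Char → Bool
  | [] => true
  | c :: cs => if !(PySem.Chars.isalnum c || c == '_') then false else pvCheckChars cs

-- outer loop: 'for seg in segments: if not seg or not seg[0].isalnum(): return False; <inner loop>'
def pvCheckSegs : List (List Char) → Bool
  | [] => true
  | [] :: _ => false
  | (c :: cs) :: rest =>
      if !(PySem.Chars.isalnum c) then false
      else if pvCheckChars (c :: cs) then pvCheckSegs rest else false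

def is_valid_package_name (name : String) : Bool :=
  if PySem.Str.isIn "." name = false then false
  else pvCheckSegs (PySem.Chars.splitOn name.toList ['.'])

-- ===== PORT B =====
def pvScan : List Char → Bool → Bool → Bool
  | [], segStart, sawDot => if segStart then false else sawDot
  | c :: cs, segStart, sawDot =>
      if c == '.' then
        if segStart then false else pvScan cs true true
      else if segStart then
        if PySem.Chars.isalnum c then pvScan cs false sawDot else false
      else
        if PySem.Chars.isalnum c || c == '_' then pvScan cs false sawDot else false

def is_valid_package_name_alt (name : String) : Bool :=
  pvScan name.toList true false

-- ===== PRECONDITION & SPEC =====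
def Spec_is_valid_package_name (name : String) (out : Bool) : Prop := out = is_valid_package_name_alt name
instance (name : String) (out : Bool) : Decidable (Spec_is_valid_package_name name out) := by unfold Spec_is_valid_package_name; infer_instance

-- ===== CLAIM (what is proved, stated in full; the proofs are below) =====
def Claim_equal_is_valid_package_name : Prop := ∀ (name : String), Dom_is_valid_package_name name → Spec_is_valid_package_name name (is_valid_package_name name)

-- ===== LEMMAS AND PROOFS =====

-- proof-side model of name.split("."): (first segment, remaining segments)
def pvSplit : List Char → List Char × List (List Char)
  | [] => ([], [])
  | c :: r =>
      let p := pvSplit r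
      if c = '.' then ([], p.1 :: p.2) else (c :: p.1, p.2)

lemma pvGo_spec : ∀ (fuel : Nat) (l cur : List Char) (acc : List (List Char)),
    l.length < fuel →
    PySem.Chars.splitOn.go ['.'] fuel l cur acc =
      acc.reverse ++ (cur.reverse ++ (pvSplit l).1) :: (pvSplit l).2 := by
  intro fuel
  induction fuel with
  | zero => intro l cur acc h; omega
  | succ f ih =>
      intro l cur acc h
      cases l with
      | nil => simp [PySem.Chars.splitOn.go, pvSplit]
      | cons c rest =>
          simp only [PySem.Chars.splitOn.go]
          by_cases hc : c = '.'
          · subst hc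
            rw [if_pos (by simp)]
            have hd : List.drop (['.'] : List Char).length ('.' :: rest) = rest := rfl
            rw [hd, ih rest [] (cur.reverse :: acc) (by simpa using Nat.lt_of_succ_lt_succ h)]
            simp [pvSplit]
          · rw [if_neg (by simp [List.isPrefixOf]; intro h'; exact hc h'.symm)]
            rw [ih rest (c :: cur) acc (by simpa using Nat.lt_of_succ_lt_succ h)]
            simp [pvSplit, hc]

lemma pvSplitOn_eq (l : List Char) :
    PySem.Chars.splitOn l ['.'] = (pvSplit l).1 :: (pvSplit l).2 := by
  unfold PySem.Chars.splitOn
  rw [pvGo_spec (l.length + 1) l [] [] (Nat.lt_succ_self _)]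
  simp

lemma pvSplit_tail_nil_iff : ∀ l : List Char, (pvSplit l).2 = [] ↔ '.' ∉ l := by
  intro l
  induction l with
  | nil => simp [pvSplit]
  | cons c r ih =>
      by_cases hc : c = '.'
      · subst hc; simp [pvSplit]
      · simp [pvSplit, hc, ih]
        exact fun _ h => hc h.symm

lemma pvScan_spec : ∀ (l : List Char) (sawDot : Bool),
    (pvScan l true sawDot =
      (pvCheckSegs ((pvSplit l).1 :: (pvSplit l).2) &&
        (sawDot || !(pvSplit l).2.isEmpty))) ∧
    (pvScan l false sawDot =
      (pvCheckChars (pvSplit l).1 &&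
        (if (pvSplit l).2.isEmpty then sawDot else pvCheckSegs (pvSplit l).2))) := by
  intro l
  induction l with
  | nil => intro sawDot; constructor <;> simp [pvScan, pvSplit, pvCheckSegs, pvCheckChars]
  | cons c r ih =>
      intro sawDot
      by_cases hc : c = '.'
      · subst hc
        constructor
        · simp [pvScan, pvSplit, pvCheckSegs]
        · -- mid-segment, dot: continue with segStart := true, sawDot := true
          have h1 := (ih true).1
          simp [pvScan, pvSplit, h1, pvCheckChars]
      · have hcb : (c == '.') = false := by simp [hc]
        constructor
        · -- segment start, non-dot char
          have h2 := (ih sawDot).2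
          by_cases ha : PySem.Chars.isalnum c = true
          · cases hck : pvCheckChars (pvSplit r).1 with
            | false =>
                simp [pvScan, pvSplit, pvCheckSegs, pvCheckChars, hcb, hc, ha, h2, hck]
            | true =>
                cases ht : (pvSplit r).2 with
                | nil =>
                    simp [pvScan, pvSplit, pvCheckSegs, pvCheckChars, hcb, hc, ha, h2, hck, ht,
                      Bool.and_comm]
                | cons s t =>
                    simp [pvScan, pvSplit, pvCheckSegs, pvCheckChars, hcb, hc, ha, h2, hck, ht]
          · simp only [Bool.not_eq_true] at ha
            simp [pvScan, pvSplit, pvCheckSegs, hcb, hc, ha]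
        · -- mid-segment, non-dot char
          have h2 := (ih sawDot).2
          by_cases hp : (PySem.Chars.isalnum c || c == '_') = true
          · simp [pvScan, pvSplit, pvCheckChars, hcb, hc, hp, h2, Bool.and_assoc]
          · simp only [Bool.not_eq_true] at hp
            simp [pvScan, pvSplit, pvCheckChars, hcb, hc, hp]

lemma pvDot_mem_iff (l : List Char) :
    PySem.Chars.isIn ['.'] l = true ↔ '.' ∈ l := by
  rw [PySem.Chars.isIn_iff_infix]
  constructor
  · intro h; exact h.mem (by simp)
  · intro h
    obtain ⟨s, t, rfl⟩ := List.append_of_mem h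
    exact ⟨s, t, by simp⟩

-- ===== VERDICT (by name: the statement is the Claim_ definition above) =====
theorem is_valid_package_name_spec : Claim_equal_is_valid_package_name := by
  intro name _
  unfold Spec_is_valid_package_name is_valid_package_name is_valid_package_name_alt
  rw [pvSplitOn_eq, (pvScan_spec name.toList false).1]
  have hiseq : PySem.Str.isIn "." name = PySem.Chars.isIn ['.'] name.toList := by
    simp [PySem.Str.isIn]
  by_cases hmem : '.' ∈ name.toList
  · have h1 : PySem.Str.isIn "." name = true := by
      rw [hiseq]; exact (pvDot_mem_iff _).mpr hmem
    have h2 : (pvSplit name.toList).2 ≠ [] := fun h =>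
      ((pvSplit_tail_nil_iff _).mp h) hmem
    rw [if_neg (by rw [h1]; simp)]
    cases ht : (pvSplit name.toList).2 with
    | nil => exact absurd ht h2
    | cons s t => simp [ht]
  · have h1 : PySem.Str.isIn "." name = false := by
      rw [hiseq]
      cases h : PySem.Chars.isIn ['.'] name.toList
      · rfl
      · exact absurd ((pvDot_mem_iff _).mp h) hmem
    have h2 : (pvSplit name.toList).2 = [] := (pvSplit_tail_nil_iff _).mpr hmem
    rw [if_pos h1, h2]
    simp
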